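-- pv_equiv track=rewrite | github.com/wuyuVerse/HTMLCure | htmlrefine/data_pipeline/repair/feedback/contrastive.py | _pair_frames
-- ===== SOURCE A (Python) =====
-- from typing import Dict, List, Optional, Tuple
--
-- PAIR_PRIORITY = [
--     "stable", "after_click", "keyboard", "idle_animation",
--     "scroll_bottom", "canvas_click", "hover", "gameplay",
-- ]
--
-- def _pair_frames(
--     before_screenshots: List[str],
--     before_annotations: List[dict],
--     after_screenshots: List[str],
--     after_annotations: List[dict],
--     max_pairs: int = 3,
-- ) -> List[Tuple[str, str, dict, dict]]:
--     """
--     Pair before/after frames by semantic label for contrastive comparison.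
--
--     Returns list of (before_path, after_path, before_annot, after_annot) tuples.
--     Matches by label prefix (e.g. "after_click_btn_0" matches "after_click_btn_0").
--     Falls back to positional pairing when labels don't match.
--     """
--     # Build {label: (path, annotation)} dicts
--     before_map: Dict[str, Tuple[str, dict]] = {}
--     for i, fa in enumerate(before_annotations):
--         if i < len(before_screenshots):
--             label = fa.get("label", f"frame_{i}")
--             before_map[label] = (before_screenshots[i], fa)
--
--     after_map: Dict[str, Tuple[str, dict]] = {}
--     for i, fa in enumerate(after_annotations):
--         if i < len(after_screenshots):
--             label = fa.get("label", f"frame_{i}")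
--             after_map[label] = (after_screenshots[i], fa)
--
--     pairs: List[Tuple[str, str, dict, dict]] = []
--     used_before: set = set()
--     used_after: set = set()
--
--     # Pass 1: exact label match by priority
--     for priority_prefix in PAIR_PRIORITY:
--         if len(pairs) >= max_pairs:
--             break
--         for b_label, (b_path, b_fa) in before_map.items():
--             if b_label in used_before or not b_label.startswith(priority_prefix):
--                 continue
--             # Find matching after label
--             for a_label, (a_path, a_fa) in after_map.items():
--                 if a_label in used_after:
--                     continue
--                 if a_label == b_label or (
--                     a_label.startswith(priority_prefix) and b_label.startswith(priority_prefix)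
--                 ):
--                     pairs.append((b_path, a_path, b_fa, a_fa))
--                     used_before.add(b_label)
--                     used_after.add(a_label)
--                     break
--             if len(pairs) >= max_pairs:
--                 break
--
--     # Pass 2: positional fallback for remaining slots
--     if len(pairs) < max_pairs:
--         remaining_before = [
--             (i, before_screenshots[i], before_annotations[i] if i < len(before_annotations) else {})
--             for i in range(min(len(before_screenshots), len(before_annotations)))
--             if before_annotations[i].get("label", f"frame_{i}") not in used_before
--         ]
--         remaining_after = [
--             (i, after_screenshots[i], after_annotations[i] if i < len(after_annotations) else {})
--             for i in range(min(len(after_screenshots), len(after_annotations)))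
--             if after_annotations[i].get("label", f"frame_{i}") not in used_after
--         ]
--         for (_, b_path, b_fa), (_, a_path, a_fa) in zip(remaining_before, remaining_after):
--             if len(pairs) >= max_pairs:
--                 break
--             pairs.append((b_path, a_path, b_fa, a_fa))
--
--     return pairs
-- ===== SOURCE B (Python) =====
-- from typing import Dict, List, Tuple
--
-- PAIR_PRIORITY = [
--     "stable", "after_click", "keyboard", "idle_animation",
--     "scroll_bottom", "canvas_click", "hover", "gameplay",
-- ]
--
-- def _label_map(shots, annots):
--     m = {}
--     for i, fa in enumerate(annots):
--         if i < len(shots):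
--             m[fa.get("label", f"frame_{i}")] = (shots[i], fa)
--     return m
--
-- def _pair_frames(
--     before_screenshots: List[str],
--     before_annotations: List[dict],
--     after_screenshots: List[str],
--     after_annotations: List[dict],
--     max_pairs: int = 3,
-- ) -> List[Tuple[str, str, dict, dict]]:
--     before_map = _label_map(before_screenshots, before_annotations)
--     after_map = _label_map(after_screenshots, after_annotations)
--
--     cap = max(0, max_pairs)
--
--     # Pass 1: no PAIR_PRIORITY prefix is a prefix of another, so the nested
--     # priority/rescan loops of the original collapse to zipping, per prefix,
--     # the before and after entries whose label starts with it.
--     matched = []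
--     for prefix in PAIR_PRIORITY:
--         b_group = [kv for kv in before_map.items() if kv[0].startswith(prefix)]
--         a_group = [kv for kv in after_map.items() if kv[0].startswith(prefix)]
--         matched.extend(zip(b_group, a_group))
--     matched = matched[:cap]
--
--     pairs = [(bp, ap, bfa, afa) for (_, (bp, bfa)), (_, (ap, afa)) in matched]
--     used_before = {bl for (bl, _), _ in matched}
--     used_after = {al for _, (al, _) in matched}
--
--     # Pass 2: positional fallback for remaining slots
--     remaining_before = [
--         (before_screenshots[i], before_annotations[i])
--         for i in range(min(len(before_screenshots), len(before_annotations)))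
--         if before_annotations[i].get("label", f"frame_{i}") not in used_before
--     ]
--     remaining_after = [
--         (after_screenshots[i], after_annotations[i])
--         for i in range(min(len(after_screenshots), len(after_annotations)))
--         if after_annotations[i].get("label", f"frame_{i}") not in used_after
--     ]
--     pairs.extend(
--         (bp, ap, bfa, afa)
--         for (bp, bfa), (ap, afa) in list(zip(remaining_before, remaining_after))[: cap - len(pairs)]
--     )
--     return pairs
-- ===== Notes on version B (the rewrite author's own statement) =====
-- stated objective: simpler
-- what changed: Pass 1's triple-nested loop (priority prefixes x rescan of before_map x linear search of after_map with used-sets) is replaced by, per prefix, zipping the before and after entries whose labels start with it (valid because no PAIR_PRIORITY prefix is a prefix of another) and truncating the concatenation to max_pairs; pass 2 keeps the positional fallback as a slice instead of a break loop.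
import Mathlib
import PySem

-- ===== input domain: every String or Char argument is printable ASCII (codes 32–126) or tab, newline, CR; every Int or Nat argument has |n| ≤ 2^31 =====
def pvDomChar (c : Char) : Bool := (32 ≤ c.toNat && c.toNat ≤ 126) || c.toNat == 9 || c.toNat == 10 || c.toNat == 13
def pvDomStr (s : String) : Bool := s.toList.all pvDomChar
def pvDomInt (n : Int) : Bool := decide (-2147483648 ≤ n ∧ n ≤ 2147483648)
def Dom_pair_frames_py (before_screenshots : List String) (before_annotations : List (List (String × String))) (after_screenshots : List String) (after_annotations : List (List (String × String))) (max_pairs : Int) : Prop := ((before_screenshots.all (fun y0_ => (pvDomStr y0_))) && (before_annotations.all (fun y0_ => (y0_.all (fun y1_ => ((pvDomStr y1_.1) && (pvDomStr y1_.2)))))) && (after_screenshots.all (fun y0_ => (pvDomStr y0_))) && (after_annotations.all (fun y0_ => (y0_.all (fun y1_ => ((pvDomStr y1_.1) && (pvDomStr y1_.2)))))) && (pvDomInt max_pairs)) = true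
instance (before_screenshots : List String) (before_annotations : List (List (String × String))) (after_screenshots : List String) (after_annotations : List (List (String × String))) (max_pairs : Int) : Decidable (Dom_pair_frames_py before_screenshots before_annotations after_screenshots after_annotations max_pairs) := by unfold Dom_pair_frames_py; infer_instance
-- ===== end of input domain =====

-- B replaces A's triple-nested priority/rescan matching of pass 1 by per-prefix filter-and-zip
-- followed by a single truncation (no PAIR_PRIORITY prefix is a prefix of another); objective: simpler.

abbrev pvAnn : Type := List (String × String)

abbrev pvItem : Type := String × String × pvAnn

abbrev pvPair : Type := String × String × pvAnn × pvAnn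

abbrev pvSt : Type := List pvPair × PySem.Set String × PySem.Set String

def pvPAIR_PRIORITY : List String :=
  ["stable", "after_click", "keyboard", "idle_animation",
   "scroll_bottom", "canvas_click", "hover", "gameplay"]

def pvGetLabel (i : Int) (fa : pvAnn) : String :=
  (PySem.Dict.mk fa).getD "label" ("frame_" ++ PySem.Int.toStr i)

def pvBuildMap (shots : List String) (anns : List pvAnn) : PySem.Dict String (String × pvAnn) :=
  (PySem.List.enumerate anns).foldl
    (fun m ifa =>
      if ifa.1 < (shots.length : Int) then
        m.insert (pvGetLabel ifa.1 ifa.2) (PySem.List.pyGetD shots ifa.1 "", ifa.2)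
      else m)
    PySem.Dict.empty

-- ===== PORT A =====
def pvALoop (p bl bpath : String) (bfa : pvAnn) (st : pvSt) : List pvItem → pvSt
  | [] => st
  | (al, av) :: rest =>
    if PySem.Set.contains st.2.2 al then pvALoop p bl bpath bfa st rest
    else if al == bl || (PySem.Str.startswith al p && PySem.Str.startswith bl p) then
      (st.1 ++ [(bpath, av.1, bfa, av.2)], PySem.Set.add st.2.1 bl, PySem.Set.add st.2.2 al)
    else pvALoop p bl bpath bfa st rest

def pvBLoop (maxp : Int) (p : String) (aItems : List pvItem) : List pvItem → pvSt → pvSt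
  | [], st => st
  | (bl, bv) :: rest, st =>
    if PySem.Set.contains st.2.1 bl || !PySem.Str.startswith bl p then
      pvBLoop maxp p aItems rest st
    else
      let st' := pvALoop p bl bv.1 bv.2 st aItems
      if maxp ≤ (st'.1.length : Int) then st' else pvBLoop maxp p aItems rest st'

def pvPrioLoop (maxp : Int) (bItems aItems : List pvItem) : List String → pvSt → pvSt
  | [], st => st
  | p :: ps, st =>
    if maxp ≤ (st.1.length : Int) then st
    else pvPrioLoop maxp bItems aItems ps (pvBLoop maxp p aItems bItems st)

def pvARemain (shots : List String) (anns : List pvAnn) (used : PySem.Set String) :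
    List (Int × String × pvAnn) :=
  ((PySem.List.pyRange 0 ((min shots.length anns.length : Nat) : Int)).filter
    (fun i => !PySem.Set.contains used (pvGetLabel i (PySem.List.pyGetD anns i [])))).map
    (fun i => (i, PySem.List.pyGetD shots i "",
      if i < (anns.length : Int) then PySem.List.pyGetD anns i [] else []))

def pvZipLoop (maxp : Int) :
    List ((Int × String × pvAnn) × (Int × String × pvAnn)) → List pvPair → List pvPair
  | [], pairs => pairs
  | (b, a) :: rest, pairs =>
    if maxp ≤ (pairs.length : Int) then pairs
    else pvZipLoop maxp rest (pairs ++ [(b.2.1, a.2.1, b.2.2, a.2.2)])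

def pair_frames_py (before_screenshots : List String) (before_annotations : List (List (String × String))) (after_screenshots : List String) (after_annotations : List (List (String × String))) (max_pairs : Int) : List (String × String × (List (String × String)) × (List (String × String))) :=
  let before_map := pvBuildMap before_screenshots before_annotations
  let after_map := pvBuildMap after_screenshots after_annotations
  let st := pvPrioLoop max_pairs before_map.items after_map.items pvPAIR_PRIORITY
      ([], PySem.Set.empty, PySem.Set.empty)
  if (st.1.length : Int) < max_pairs then
    pvZipLoop max_pairs
      ((pvARemain before_screenshots before_annotations st.2.1).zip
       (pvARemain after_screenshots after_annotations st.2.2))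
      st.1
  else st.1

-- ===== PORT B =====
def pvGroup (p : String) (items : List pvItem) : List pvItem :=
  items.filter (fun kv => PySem.Str.startswith kv.1 p)

def pvBRemain (shots : List String) (anns : List pvAnn) (used : PySem.Set String) :
    List (String × pvAnn) :=
  ((PySem.List.pyRange 0 ((min shots.length anns.length : Nat) : Int)).filter
    (fun i => !PySem.Set.contains used (pvGetLabel i (PySem.List.pyGetD anns i [])))).map
    (fun i => (PySem.List.pyGetD shots i "", PySem.List.pyGetD anns i []))

def pair_frames_py_alt (before_screenshots : List String) (before_annotations : List (List (String × String))) (after_screenshots : List String) (after_annotations : List (List (String × String))) (max_pairs : Int) : List (String × String × (List (String × String)) × (List (String × String))) :=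
  let before_map := pvBuildMap before_screenshots before_annotations
  let after_map := pvBuildMap after_screenshots after_annotations
  let cap : Int := max 0 max_pairs
  let matched := PySem.List.slice
      (pvPAIR_PRIORITY.foldl
        (fun acc p => acc ++ (pvGroup p before_map.items).zip (pvGroup p after_map.items)) [])
      none (some cap)
  let pairs := matched.map (fun m => (m.1.2.1, m.2.2.1, m.1.2.2, m.2.2.2))
  let usedB := PySem.Set.ofList (matched.map (fun m => m.1.1))
  let usedA := PySem.Set.ofList (matched.map (fun m => m.2.1))
  pairs ++
    (PySem.List.slice
      ((pvBRemain before_screenshots before_annotations usedB).zip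
       (pvBRemain after_screenshots after_annotations usedA))
      none (some (cap - (pairs.length : Int)))).map
      (fun z => (z.1.1, z.2.1, z.1.2, z.2.2))

-- ===== PRECONDITION & SPEC =====
def Spec_pair_frames_py (before_screenshots : List String) (before_annotations : List (List (String × String))) (after_screenshots : List String) (after_annotations : List (List (String × String))) (max_pairs : Int) (out : List (String × String × (List (String × String)) × (List (String × String)))) : Prop := out = pair_frames_py_alt before_screenshots before_annotations after_screenshots after_annotations max_pairs
instance (before_screenshots : List String) (before_annotations : List (List (String × String))) (after_screenshots : List String) (after_annotations : List (List (String × String))) (max_pairs : Int) (out : List (String × String × (List (String × String)) × (List (String × String)))) : Decidable (Spec_pair_frames_py before_screenshots before_annotations after_screenshots after_annotations max_pairs out) := by unfold Spec_pair_frames_py; infer_instance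

-- ===== CLAIM (what is proved, stated in full; the proofs are below) =====
def Claim_equal_pair_frames_py : Prop := ∀ (before_screenshots : List String) (before_annotations : List (List (String × String))) (after_screenshots : List String) (after_annotations : List (List (String × String))) (max_pairs : Int), Dom_pair_frames_py before_screenshots before_annotations after_screenshots after_annotations max_pairs → Spec_pair_frames_py before_screenshots before_annotations after_screenshots after_annotations max_pairs (pair_frames_py before_screenshots before_annotations after_screenshots after_annotations max_pairs)

-- ===== LEMMAS AND PROOFS =====
def pvFilt (S : PySem.Set String) (p : String) (items : List pvItem) : List pvItem :=
  items.filter (fun it => !PySem.Set.contains S it.1 && PySem.Str.startswith it.1 p)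

def pvMk (m : pvItem × pvItem) : pvPair := (m.1.2.1, m.2.2.1, m.1.2.2, m.2.2.2)

def pvAddAll (S : PySem.Set String) (ls : List String) : PySem.Set String :=
  ls.foldl PySem.Set.add S

lemma pvContains_add (S : PySem.Set String) (x l : String) :
    PySem.Set.contains (PySem.Set.add S x) l = ((l == x) || PySem.Set.contains S l) := by
  by_cases hx : PySem.Set.contains S x = true
  · simp only [PySem.Set.add, hx, if_true]
    by_cases h : l = x
    · subst h; simp only [beq_self_eq_true, Bool.true_or]; exact hx
    · simp [h]
  · simp only [PySem.Set.add, hx]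
    by_cases h : l = x <;> simp [h, PySem.Set.contains]

lemma pvContains_addAll (ls : List String) : ∀ (S : PySem.Set String) (l : String),
    PySem.Set.contains (pvAddAll S ls) l = true →
    PySem.Set.contains S l = true ∨ l ∈ ls := by
  induction ls with
  | nil => intro S l h; exact Or.inl h
  | cons x t ih =>
    intro S l h
    rcases ih (PySem.Set.add S x) l h with h' | h'
    · rw [pvContains_add] at h'
      rcases Bool.or_eq_true_iff.mp h' with h2 | h2
      · exact Or.inr (by simp [eq_of_beq h2])
      · exact Or.inl h2
    · exact Or.inr (List.mem_cons_of_mem _ h')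

lemma pvFilt_add (S : PySem.Set String) (x p : String) (items : List pvItem) :
    pvFilt (PySem.Set.add S x) p items = (pvFilt S p items).filter (fun it => !(it.1 == x)) := by
  unfold pvFilt
  rw [List.filter_filter]
  apply List.filter_congr
  intro it _
  rw [pvContains_add]
  cases h1 : (it.1 == x) <;> cases h2 : PySem.Set.contains S it.1 <;>
    cases h3 : PySem.Str.startswith it.1 p <;> simp

lemma pvFilt_add_absent (S : PySem.Set String) (x p : String) (items : List pvItem)
    (hx : x ∉ items.map (·.1)) :
    pvFilt (PySem.Set.add S x) p items = pvFilt S p items := by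
  rw [pvFilt_add]
  apply List.filter_eq_self.mpr
  intro it hit
  have : it.1 ≠ x := by
    intro he; exact hx (he ▸ List.mem_map_of_mem (List.mem_of_mem_filter hit))
  simp [this]

lemma pvFilt_add_head (S : PySem.Set String) (p : String) (items : List pvItem)
    (hnd : (items.map (·.1)).Nodup) (a0 : pvItem) (t : List pvItem)
    (h : pvFilt S p items = a0 :: t) :
    pvFilt (PySem.Set.add S a0.1) p items = t := by
  rw [pvFilt_add, h]
  have hndf : ((a0 :: t).map (·.1)).Nodup := by
    rw [← h]
    exact List.Nodup.sublist (List.Sublist.map _ List.filter_sublist) hnd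
  simp only [List.map_cons, List.nodup_cons] at hndf
  rw [List.filter_cons]
  simp only [beq_self_eq_true, Bool.not_true, Bool.false_eq_true, if_false]
  apply List.filter_eq_self.mpr
  intro it hit
  have : it.1 ≠ a0.1 := by
    intro he; exact hndf.1 (he ▸ List.mem_map_of_mem hit)
  simp [this]

lemma pvFilt_cons_pos (S : PySem.Set String) (p : String) (hd : pvItem) (rest : List pvItem)
    (h1 : PySem.Set.contains S hd.1 = false) (h2 : PySem.Str.startswith hd.1 p = true) :
    pvFilt S p (hd :: rest) = hd :: pvFilt S p rest := by
  unfold pvFilt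
  rw [List.filter_cons]
  have h2' : PySem.Chars.startswith hd.1.toList p.toList = true := by
    simpa [PySem.Str.startswith] using h2
  have h1' : hd.1 ∉ S := by simpa [PySem.Set.contains] using h1
  simp [h1', h2', PySem.Str.startswith, PySem.Set.contains]

lemma pvFilt_cons_neg (S : PySem.Set String) (p : String) (hd : pvItem) (rest : List pvItem)
    (h : PySem.Set.contains S hd.1 = true ∨ PySem.Str.startswith hd.1 p = false) :
    pvFilt S p (hd :: rest) = pvFilt S p rest := by
  unfold pvFilt
  rw [List.filter_cons]
  have hc : (!PySem.Set.contains S hd.1 && PySem.Str.startswith hd.1 p) = false := by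
    rcases h with h | h <;> rw [h] <;> simp
  rw [hc]
  simp

lemma pvALoop_spec (p bl bp : String) (bfa : pvAnn) (hbl : PySem.Str.startswith bl p = true) :
    ∀ (aItems : List pvItem) (pairs : List pvPair) (SB SA : PySem.Set String),
    pvALoop p bl bp bfa (pairs, SB, SA) aItems =
      match pvFilt SA p aItems with
      | [] => (pairs, SB, SA)
      | a0 :: _ => (pairs ++ [(bp, a0.2.1, bfa, a0.2.2)],
                    PySem.Set.add SB bl, PySem.Set.add SA a0.1) := by
  intro aItems
  induction aItems with
  | nil => intro pairs SB SA; simp [pvALoop, pvFilt]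
  | cons hd rest ih =>
    intro pairs SB SA
    obtain ⟨al, av⟩ := hd
    rw [pvALoop]
    by_cases hc : PySem.Set.contains SA al = true
    · rw [if_pos hc, ih]
      have hm : al ∈ SA := by simpa [PySem.Set.contains] using hc
      have : pvFilt SA p ((al, av) :: rest) = pvFilt SA p rest := by
        unfold pvFilt; rw [List.filter_cons]; simp [hm]
      rw [this]
    · rw [if_neg hc]
      simp only [Bool.not_eq_true] at hc
      by_cases hsw : PySem.Str.startswith al p = true
      · have hcond : (al == bl || (PySem.Str.startswith al p && PySem.Str.startswith bl p)) = true := by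
          simp only [Bool.or_eq_true, Bool.and_eq_true]
          exact Or.inr ⟨hsw, hbl⟩
        rw [if_pos hcond]
        have hm : al ∉ SA := by simpa [PySem.Set.contains] using hc
        have : pvFilt SA p ((al, av) :: rest) = (al, av) :: pvFilt SA p rest := by
          unfold pvFilt; rw [List.filter_cons]
          have hsw' : PySem.Chars.startswith al.toList p.toList = true := by
            simpa [PySem.Str.startswith] using hsw
          simp [hm, hsw']
        rw [this]
      · have hne : ¬(al = bl) := by
          intro he; exact hsw (he ▸ hbl)
        have hcond : (al == bl || (PySem.Str.startswith al p && PySem.Str.startswith bl p)) = false := by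
          simp only [Bool.not_eq_true] at hsw
          simp only [Bool.or_eq_false_iff, Bool.and_eq_false_iff]
          exact ⟨by simp [hne], Or.inl hsw⟩
        rw [hcond]
        simp only [Bool.false_eq_true, if_false]
        rw [ih]
        have : pvFilt SA p ((al, av) :: rest) = pvFilt SA p rest := by
          unfold pvFilt; rw [List.filter_cons]
          simp only [Bool.not_eq_true] at hsw
          have hsw' : PySem.Chars.startswith al.toList p.toList = false := by
            simpa [PySem.Str.startswith] using hsw
          simp [hsw']
        rw [this]

lemma pvBLoop_spec (maxp : Int) (p : String) (aItems : List pvItem)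
    (hnda : (aItems.map (·.1)).Nodup) :
    ∀ (bItems : List pvItem) (pairs : List pvPair) (SB SA : PySem.Set String),
    (bItems.map (·.1)).Nodup →
    (pairs.length : Int) < maxp →
    pvBLoop maxp p aItems bItems (pairs, SB, SA) =
      (let tk := ((pvFilt SB p bItems).zip (pvFilt SA p aItems)).take (maxp - pairs.length).toNat
       (pairs ++ tk.map pvMk,
        pvAddAll SB (tk.map (·.1.1)),
        pvAddAll SA (tk.map (·.2.1)))) := by
  intro bItems
  induction bItems with
  | nil =>
    intro pairs SB SA _ _
    simp [pvBLoop, pvFilt, pvAddAll]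
  | cons hd rest ih =>
    intro pairs SB SA hndb hlen
    obtain ⟨bl, bv⟩ := hd
    simp only [List.map_cons, List.nodup_cons] at hndb
    obtain ⟨hblrest, hndrest⟩ := hndb
    rw [pvBLoop]
    by_cases hskip : (PySem.Set.contains SB bl || !PySem.Str.startswith bl p) = true
    · rw [if_pos hskip, ih pairs SB SA hndrest hlen]
      have : pvFilt SB p ((bl, bv) :: rest) = pvFilt SB p rest := by
        apply pvFilt_cons_neg
        rcases Bool.or_eq_true_iff.mp hskip with h | h
        · exact Or.inl h
        · exact Or.inr (by simpa using h)
      rw [this]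
    · rw [if_neg hskip]
      simp only [Bool.or_eq_true, Bool.not_eq_true', not_or, Bool.not_eq_false] at hskip
      obtain ⟨hSB, hsw⟩ := hskip
      have hSB' : PySem.Set.contains SB bl = false := by simpa using hSB
      rw [pvALoop_spec p bl bv.1 bv.2 hsw]
      have hFB : pvFilt SB p ((bl, bv) :: rest) = (bl, bv) :: pvFilt SB p rest :=
        pvFilt_cons_pos _ _ _ _ hSB' hsw
      cases hFA : pvFilt SA p aItems with
      | nil =>
        simp only
        rw [if_neg (by exact not_le.mpr hlen)]
        rw [ih pairs SB SA hndrest hlen, hFA, hFB]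
        simp [pvAddAll]
      | cons a0 t =>
        simp only
        have hl2 : ((pairs ++ [(bv.1, a0.2.1, bv.2, a0.2.2)]).length : Int)
            = (pairs.length : Int) + 1 := by simp
        rw [hl2]
        by_cases hstop : maxp ≤ (pairs.length : Int) + 1
        · rw [if_pos hstop]
          have hk : (maxp - (pairs.length : Int)).toNat = 1 := by omega
          rw [hFB, hk, List.zip_cons_cons]
          simp [pvMk, pvAddAll]
        · rw [if_neg hstop]
          have hlen' : (((pairs ++ [(bv.1, a0.2.1, bv.2, a0.2.2)]).length : Int)) < maxp := by
            rw [hl2]; omega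
          rw [ih _ _ _ hndrest hlen']
          rw [pvFilt_add_absent SB bl p rest hblrest]
          rw [pvFilt_add_head SA p aItems hnda a0 t hFA]
          rw [hFB, hl2, List.zip_cons_cons]
          have hk : (maxp - (pairs.length : Int)).toNat
              = ((maxp - ((pairs.length : Int) + 1)).toNat) + 1 := by omega
          rw [hk, List.take_succ_cons]
          simp [pvMk, pvAddAll]

lemma pvFilt_eq_group (S : PySem.Set String) (p : String) (items : List pvItem)
    (h : ∀ l, PySem.Set.contains S l = true → PySem.Str.startswith l p = false) :
    pvFilt S p items = pvGroup p items := by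
  unfold pvFilt pvGroup
  apply List.filter_congr
  intro it _
  cases hsw : PySem.Str.startswith it.1 p with
  | false => rw [Bool.and_false]
  | true =>
    have hc : PySem.Set.contains S it.1 = false := by
      cases hc2 : PySem.Set.contains S it.1
      · rfl
      · rw [h it.1 hc2] at hsw; exact absurd hsw (by simp)
    rw [hc, Bool.not_false, Bool.true_and]

lemma pvPrioLoop_spec (maxp : Int) (bItems aItems : List pvItem)
    (hndb : (bItems.map (·.1)).Nodup) (hnda : (aItems.map (·.1)).Nodup) :
    ∀ (ps : List String) (pairs : List pvPair) (SB SA : PySem.Set String),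
    ps.Pairwise (fun p q => ∀ l : String,
      ¬(PySem.Str.startswith l p = true ∧ PySem.Str.startswith l q = true)) →
    (∀ l, PySem.Set.contains SB l = true → ∀ q ∈ ps, PySem.Str.startswith l q = false) →
    (∀ l, PySem.Set.contains SA l = true → ∀ q ∈ ps, PySem.Str.startswith l q = false) →
    pvPrioLoop maxp bItems aItems ps (pairs, SB, SA) =
      (let M := ps.flatMap (fun p => (pvGroup p bItems).zip (pvGroup p aItems))
       let tk := M.take (maxp - pairs.length).toNat
       (pairs ++ tk.map pvMk,
        pvAddAll SB (tk.map (·.1.1)),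
        pvAddAll SA (tk.map (·.2.1)))) := by
  intro ps
  induction ps with
  | nil => intro pairs SB SA _ _ _; simp [pvPrioLoop, pvAddAll]
  | cons p ps' ih =>
    intro pairs SB SA hpw hSB hSA
    rw [List.pairwise_cons] at hpw
    obtain ⟨hdisj, hpw'⟩ := hpw
    rw [pvPrioLoop]
    by_cases hstop : maxp ≤ ((pairs.length : Int))
    · rw [if_pos hstop]
      have h0 : (maxp - (pairs.length : Int)).toNat = 0 := by omega
      simp [h0, pvAddAll]
    · rw [if_neg hstop]
      have hlen : ((pairs.length : Int)) < maxp := by omega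
      rw [pvBLoop_spec maxp p aItems hnda bItems pairs SB SA hndb hlen]
      simp only
      rw [pvFilt_eq_group SB p bItems (fun l hc => hSB l hc p (List.mem_cons_self))]
      rw [pvFilt_eq_group SA p aItems (fun l hc => hSA l hc p (List.mem_cons_self))]
      set g1 := (pvGroup p bItems).zip (pvGroup p aItems) with hg1
      set k := (maxp - (pairs.length : Int)).toNat with hk
      set tk := g1.take k with htk
      have hmemB : ∀ l, l ∈ (tk.map (fun m => m.1.1)) → PySem.Str.startswith l p = true := by
        intro l hl
        obtain ⟨⟨mb, ma⟩, hm, rfl⟩ := List.mem_map.mp hl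
        have hmb : mb ∈ pvGroup p bItems := (List.of_mem_zip (List.mem_of_mem_take hm)).1
        exact (List.mem_filter.mp hmb).2
      have hmemA : ∀ l, l ∈ (tk.map (fun m => m.2.1)) → PySem.Str.startswith l p = true := by
        intro l hl
        obtain ⟨⟨mb, ma⟩, hm, rfl⟩ := List.mem_map.mp hl
        have hma : ma ∈ pvGroup p aItems := (List.of_mem_zip (List.mem_of_mem_take hm)).2
        exact (List.mem_filter.mp hma).2
      have hSB1 : ∀ l, PySem.Set.contains (pvAddAll SB (tk.map (fun m => m.1.1))) l = true →
          ∀ q ∈ ps', PySem.Str.startswith l q = false := by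
        intro l hc q hq
        rcases pvContains_addAll _ _ _ hc with h | h
        · exact hSB l h q (List.mem_cons_of_mem _ hq)
        · cases hq2 : PySem.Str.startswith l q
          · rfl
          · exact absurd ⟨hmemB l h, hq2⟩ (hdisj q hq l)
      have hSA1 : ∀ l, PySem.Set.contains (pvAddAll SA (tk.map (fun m => m.2.1))) l = true →
          ∀ q ∈ ps', PySem.Str.startswith l q = false := by
        intro l hc q hq
        rcases pvContains_addAll _ _ _ hc with h | h
        · exact hSA l h q (List.mem_cons_of_mem _ hq)
        · cases hq2 : PySem.Str.startswith l q
          · rfl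
          · exact absurd ⟨hmemA l h, hq2⟩ (hdisj q hq l)
      rw [ih _ _ _ hpw' hSB1 hSA1]
      simp only
      set M' := ps'.flatMap (fun q => (pvGroup q bItems).zip (pvGroup q aItems)) with hM'
      have hk' : (maxp - (((pairs ++ tk.map pvMk).length : Int))).toNat = k - g1.length := by
        have h1 : tk.length = min k g1.length := by rw [htk]; exact List.length_take
        simp only [List.length_append, List.length_map]
        omega
      rw [hk']
      have hsplit : (((p :: ps').flatMap
            (fun q => (pvGroup q bItems).zip (pvGroup q aItems))).take k)
          = tk ++ M'.take (k - g1.length) := by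
        rw [List.flatMap_cons, List.take_append, ← hg1, ← hM', ← htk]
      rw [hsplit]
      simp only [List.map_append]
      simp only [Prod.mk.injEq]
      refine ⟨by rw [List.append_assoc], ?_, ?_⟩ <;>
        · unfold pvAddAll; rw [List.foldl_append]

lemma pvZipLoop_spec (maxp : Int) :
    ∀ (zs : List ((Int × String × pvAnn) × (Int × String × pvAnn))) (pairs : List pvPair),
    pvZipLoop maxp zs pairs =
      pairs ++ (zs.take (maxp - pairs.length).toNat).map
        (fun z => (z.1.2.1, z.2.2.1, z.1.2.2, z.2.2.2)) := by
  intro zs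
  induction zs with
  | nil => intro pairs; simp [pvZipLoop]
  | cons hd rest ih =>
    intro pairs
    obtain ⟨b, a⟩ := hd
    rw [pvZipLoop]
    by_cases h : maxp ≤ (pairs.length : Int)
    · rw [if_pos h]
      have : (maxp - pairs.length).toNat = 0 := by omega
      simp [this]
    · rw [if_neg h, ih]
      have h1 : (maxp - ((pairs ++ [(b.2.1, a.2.1, b.2.2, a.2.2)]).length : Int)).toNat + 1
          = (maxp - (pairs.length : Int)).toNat := by
        simp; omega
      rw [← h1, List.take_succ_cons, List.map_cons]
      simp

lemma pvSW_prefix {l p : String} (h : PySem.Str.startswith l p = true) :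
    p.toList <+: l.toList := by
  simp only [PySem.Str.startswith, PySem.Chars.startswith] at h
  exact List.isPrefixOf_iff_prefix.mp h

lemma pvPP_pairwise : pvPAIR_PRIORITY.Pairwise (fun p q => ∀ l : String,
    ¬(PySem.Str.startswith l p = true ∧ PySem.Str.startswith l q = true)) := by
  have hnp : pvPAIR_PRIORITY.Pairwise
      (fun p q => ¬(p.toList <+: q.toList) ∧ ¬(q.toList <+: p.toList)) := by decide
  refine hnp.imp ?_
  intro p q h l hc
  rcases List.prefix_or_prefix_of_prefix (pvSW_prefix hc.1) (pvSW_prefix hc.2) with hp | hp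
  · exact h.1 hp
  · exact h.2 hp

lemma pvBuildMap_nodup (shots : List String) (anns : List pvAnn) :
    ((pvBuildMap shots anns).items.map (·.1)).Nodup := by
  have key : ∀ (l : List (Int × pvAnn)) (d : PySem.Dict String (String × pvAnn)), d.keys.Nodup →
      ((l.foldl (fun m ifa =>
        if ifa.1 < (shots.length : Int) then
          m.insert (pvGetLabel ifa.1 ifa.2) (PySem.List.pyGetD shots ifa.1 "", ifa.2)
        else m) d).keys).Nodup := by
    intro l
    induction l with
    | nil => intro d hd; exact hd
    | cons x t ih =>
      intro d hd
      simp only [List.foldl_cons]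
      by_cases hx : x.1 < (shots.length : Int)
      · rw [if_pos hx]; exact ih _ (PySem.Dict.nodup_keys_insert _ _ _ hd)
      · rw [if_neg hx]; exact ih _ hd
  have h := key (PySem.List.enumerate anns) PySem.Dict.empty PySem.Dict.nodup_keys_empty
  unfold pvBuildMap
  simpa [PySem.Dict.keys] using h

lemma pvRem_map_eq (bs : List String) (ba : List pvAnn) (as_ : List String) (aa : List pvAnn)
    (u1 u2 : PySem.Set String) :
    ((pvARemain bs ba u1).zip (pvARemain as_ aa u2)).map
      (fun z => (z.1.2.1, z.2.2.1, z.1.2.2, z.2.2.2))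
    = ((pvBRemain bs ba u1).zip (pvBRemain as_ aa u2)).map
      (fun z => (z.1.1, z.2.1, z.1.2, z.2.2)) := by
  unfold pvARemain pvBRemain
  rw [List.zip_map, List.zip_map, List.map_map, List.map_map]
  apply List.map_congr_left
  intro x hx
  obtain ⟨i, j⟩ := x
  have hi : i ∈ PySem.List.pyRange 0 ((min bs.length ba.length : Nat) : Int) :=
    List.mem_of_mem_filter (List.of_mem_zip hx).1
  have hj : j ∈ PySem.List.pyRange 0 ((min as_.length aa.length : Nat) : Int) :=
    List.mem_of_mem_filter (List.of_mem_zip hx).2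
  rw [PySem.List.mem_pyRange_one] at hi hj
  have hiba : i < (ba.length : Int) := by
    have := hi.2; push_cast at this; omega
  have hjaa : j < (aa.length : Int) := by
    have := hj.2; push_cast at this; omega
  simp [Prod.map, Function.comp, if_pos hiba, if_pos hjaa]

theorem pair_frames_py_spec_aux (bs : List String) (ba : List pvAnn) (as_ : List String)
    (aa : List pvAnn) (maxp : Int) :
    pair_frames_py bs ba as_ aa maxp = pair_frames_py_alt bs ba as_ aa maxp := by
  have hndb := pvBuildMap_nodup bs ba
  have hnda := pvBuildMap_nodup as_ aa
  have hempty : ∀ l : String, PySem.Set.contains PySem.Set.empty l = true →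
      ∀ q ∈ pvPAIR_PRIORITY, PySem.Str.startswith l q = false := by
    intro l hc
    simp [PySem.Set.empty, PySem.Set.contains] at hc
  have hprio := pvPrioLoop_spec maxp (pvBuildMap bs ba).items (pvBuildMap as_ aa).items
    (by simpa using hndb) (by simpa using hnda) pvPAIR_PRIORITY [] PySem.Set.empty
    PySem.Set.empty pvPP_pairwise hempty hempty
  simp only [List.length_nil, Int.natCast_zero, sub_zero, List.nil_append] at hprio
  simp only [pair_frames_py, pair_frames_py_alt]
  rw [hprio]
  set M := pvPAIR_PRIORITY.flatMap
    (fun p => (pvGroup p (pvBuildMap bs ba).items).zip (pvGroup p (pvBuildMap as_ aa).items))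
    with hM
  set T := M.take maxp.toNat with hT
  -- B's matched equals T
  rw [PySem.List.foldl_append_eq_flatMap, List.nil_append]
  rw [PySem.List.slice_to _ (le_max_left 0 maxp)]
  have hcap : (max 0 maxp).toNat = maxp.toNat := by omega
  rw [hcap]
  -- identify pairs / used sets
  simp only [pvAddAll, PySem.Set.ofList_eq_foldl, PySem.Set.empty]
  rw [show (fun m : pvItem × pvItem => (m.1.2.1, m.2.2.1, m.1.2.2, m.2.2.2)) = pvMk from rfl]
  set P1 := T.map pvMk with hP1
  set UB := (T.map (fun m : pvItem × pvItem => m.1.1)).foldl PySem.Set.add [] with hUB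
  set UA := (T.map (fun m : pvItem × pvItem => m.2.1)).foldl PySem.Set.add [] with hUA
  have hlenT : P1.length ≤ maxp.toNat := by
    rw [hP1, List.length_map, hT, List.length_take]; omega
  by_cases hlt : ((P1.length : Int)) < maxp
  · rw [if_pos hlt]
    rw [pvZipLoop_spec]
    have h0 : (0:Int) ≤ max 0 maxp - (P1.length : Int) := by omega
    rw [PySem.List.slice_to _ h0]
    have h1 : (max 0 maxp - (P1.length : Int)).toNat = (maxp - (P1.length : Int)).toNat := by
      omega
    rw [h1]
    congr 1
    rw [List.map_take, List.map_take, pvRem_map_eq]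
  · rw [if_neg hlt]
    have h0 : max 0 maxp - (P1.length : Int) = 0 := by omega
    rw [h0, PySem.List.slice_to _ (le_refl 0)]
    simp

-- ===== VERDICT (by name: the statement is the Claim_ definition above) =====
theorem pair_frames_py_spec : Claim_equal_pair_frames_py := by
  intro bs ba as_ aa maxp _
  unfold Spec_pair_frames_py
  exact pair_frames_py_spec_aux bs ba as_ aa maxp
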